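-- pv_equiv track=rewrite | github.com/Nerxion/ki-anwendung | passage_retrival/filter_document.py | clean_document_sentences
-- ===== SOURCE A (Python) =====
-- def clean_document_sentences(document):
--     ''' cleans all sentences of a document '''
--     lines = document.split("\n")
--     text = ""
--     was_nicht = ["== External links ==", "== See also ==", "== References =="]
--     filter = False
--     for line in lines:
--         if filter and line == "":
--             filter = False
--             continue
--
--         if line in was_nicht:
--             filter = True
--             continue
--
--         if line != "" and not line.startswith("==") and not filter:
--             text += line + " "
--
--     return text
-- ===== SOURCE B (Python) =====
-- def clean_document_sentences(document):
--     ''' cleans all sentences of a document '''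
--     it = iter(document.split("\n"))
--     parts = []
--     was_nicht = ("== External links ==", "== See also ==", "== References ==")
--     for line in it:
--         if line in was_nicht:
--             for line in it:
--                 if line == "":
--                     break
--             continue
--         if line != "" and not line.startswith("=="):
--             parts.append(line + " ")
--     return "".join(parts)
-- ===== Notes on version B (the rewrite author's own statement) =====
-- stated objective: alternative
-- what changed: Replaces the boolean filter flag threaded across iterations by an explicit iterator with a nested inner loop that consumes each filtered section up to its blank line, and builds the result by joining collected pieces instead of repeated string concatenation.
import Mathlib
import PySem

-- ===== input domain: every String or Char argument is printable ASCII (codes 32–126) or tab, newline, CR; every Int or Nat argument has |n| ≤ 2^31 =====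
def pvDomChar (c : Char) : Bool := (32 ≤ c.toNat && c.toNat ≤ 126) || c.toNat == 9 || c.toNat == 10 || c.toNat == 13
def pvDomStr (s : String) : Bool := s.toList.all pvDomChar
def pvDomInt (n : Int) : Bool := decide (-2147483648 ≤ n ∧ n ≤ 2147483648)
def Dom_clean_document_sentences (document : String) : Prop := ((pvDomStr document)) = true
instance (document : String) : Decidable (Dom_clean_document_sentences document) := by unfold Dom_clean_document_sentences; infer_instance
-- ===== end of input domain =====

-- B replaces A's boolean filter flag by a nested skip loop over an explicit iterator and joins
-- collected pieces instead of repeated concatenation (objective: alternative decomposition).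

-- ===== PORT A =====
def pvWasNicht : List String := ["== External links ==", "== See also ==", "== References =="]

-- one iteration of A's for-loop: state = (text, filter)
def pvStepA (st : String × Bool) (line : String) : String × Bool :=
  if st.2 = true ∧ line = "" then (st.1, false)
  else if line ∈ pvWasNicht then (st.1, true)
  else if line ≠ "" ∧ PySem.Str.startswith line "==" = false ∧ st.2 = false then
    (st.1 ++ line ++ " ", st.2)
  else st

def clean_document_sentences (document : String) : String :=
  (((PySem.Str.split? document "\n").getD []).foldl pvStepA ("", false)).1

-- ===== PORT B =====
-- the inner `for line in it: if line == "": break` — consumes lines up to and including the first ""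
def pvSkip : List String → List String
  | [] => []
  | l :: rest => if l = "" then rest else pvSkip rest

theorem pvSkip_le (ls : List String) : (pvSkip ls).length ≤ ls.length := by
  induction ls with
  | nil => simp [pvSkip]
  | cons l rest ih =>
    simp only [pvSkip]
    split
    · simp
    · exact Nat.le_succ_of_le ih


-- the outer loop, collecting the pieces that Source B appends to `parts`
def pvGo : List String → List String
  | [] => []
  | l :: rest =>
    if l ∈ pvWasNicht then pvGo (pvSkip rest)
    else if l ≠ "" ∧ PySem.Str.startswith l "==" = false then (l ++ " ") :: pvGo rest
    else pvGo rest
termination_by ls => ls.length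
decreasing_by
  · exact Nat.lt_succ_of_le (pvSkip_le rest)
  · simp
  · simp

def clean_document_sentences_alt (document : String) : String :=
  PySem.Str.join "" (pvGo ((PySem.Str.split? document "\n").getD []))

-- ===== PRECONDITION & SPEC =====
def Spec_clean_document_sentences (document : String) (out : String) : Prop := out = clean_document_sentences_alt document
instance (document : String) (out : String) : Decidable (Spec_clean_document_sentences document out) := by unfold Spec_clean_document_sentences; infer_instance

-- ===== CLAIM (what is proved, stated in full; the proofs are below) =====
def Claim_equal_clean_document_sentences : Prop := ∀ (document : String), Dom_clean_document_sentences document → Spec_clean_document_sentences document (clean_document_sentences document)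

-- ===== LEMMAS AND PROOFS =====

theorem pvJoin_nil : PySem.Str.join "" ([] : List String) = "" := by
  simp [PySem.Str.join]

theorem pvJoin_cons (x : String) (xs : List String) :
    PySem.Str.join "" (x :: xs) = x ++ PySem.Str.join "" xs := by
  cases xs with
  | nil => simp [PySem.Str.join, PySem.Chars.join_singleton, PySem.Chars.join_nil]
  | cons y ys => simp [PySem.Str.join, PySem.Chars.join_cons_cons]

-- with the filter flag on, A just skips until (and including) the first blank line
theorem pvFoldA_true (ls : List String) (t : String) :
    (ls.foldl pvStepA (t, true)).1 = ((pvSkip ls).foldl pvStepA (t, false)).1 := by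
  induction ls generalizing t with
  | nil => simp [pvSkip]
  | cons l rest ih =>
    by_cases hb : l = ""
    · simp [pvSkip, hb, pvStepA]
    · have h1 : pvStepA (t, true) l = (t, true) := by
        simp only [pvStepA]
        by_cases hm : l ∈ pvWasNicht <;> simp [hb, hm]
      simp only [List.foldl_cons, h1, pvSkip, if_neg hb]
      exact ih t

theorem pvMain (ls : List String) : ∀ t : String,
    (ls.foldl pvStepA (t, false)).1 = t ++ PySem.Str.join "" (pvGo ls) := by
  induction ls using pvGo.induct with
  | case1 => intro t; simp [pvGo, pvJoin_nil]
  | case2 l rest hm ih =>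
    intro t
    have hb : l ≠ "" := by
      simp only [pvWasNicht, List.mem_cons, List.not_mem_nil, or_false] at hm
      rcases hm with rfl | rfl | rfl <;> decide
    have h1 : pvStepA (t, false) l = (t, true) := by
      simp only [pvStepA]
      rw [if_neg (by simp), if_pos hm]
    simp only [pvGo, if_pos hm, List.foldl_cons, h1]
    rw [pvFoldA_true rest t]
    exact ih t
  | case3 l rest hm hc ih =>
    intro t
    have h1 : pvStepA (t, false) l = (t ++ l ++ " ", false) := by
      simp only [pvStepA]
      rw [if_neg (by simp), if_neg (by simp [hm]), if_pos (by exact ⟨hc.1, hc.2, trivial⟩)]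
    simp only [pvGo, if_neg hm, if_pos hc, List.foldl_cons, h1]
    rw [ih, pvJoin_cons]
    simp [String.append_assoc]
  | case4 l rest hm hc ih =>
    intro t
    have h1 : pvStepA (t, false) l = (t, false) := by
      simp only [pvStepA]
      rw [if_neg (by simp), if_neg (by simp [hm]), if_neg (by intro h; exact hc ⟨h.1, h.2.1⟩)]
    simp only [pvGo, if_neg hm, if_neg hc, List.foldl_cons, h1]
    exact ih t

-- ===== VERDICT (by name: the statement is the Claim_ definition above) =====
theorem clean_document_sentences_spec : Claim_equal_clean_document_sentences := by
  intro document _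
  unfold Spec_clean_document_sentences clean_document_sentences clean_document_sentences_alt
  simpa using pvMain ((PySem.Str.split? document "\n").getD []) ""
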